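-- pv_equiv track=rewrite | github.com/NamLeAIT/DNA_storage_4 | ngs_prep_v5.py | homopolymer_count
-- ===== SOURCE A (Python) =====
-- DNAAlphabet = set("ACGT")
--
-- def clean_dna(seq: str) -> str:
--     if seq is None:
--         return ""
--     return "".join(ch for ch in str(seq).upper() if ch in DNAAlphabet)
--
-- def homopolymer_count(seq: str, min_len: int = 2) -> int:
--     seq = clean_dna(seq)
--     if not seq:
--         return 0
--     cur = 1
--     cnt = 0
--     for i in range(1, len(seq)):
--         if seq[i] == seq[i - 1]:
--             cur += 1
--         else:
--             if cur >= min_len: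
--                 cnt += 1
--             cur = 1
--     if cur >= min_len:
--         cnt += 1
--     return cnt
-- ===== SOURCE B (Python) =====
-- DNAAlphabet = set("ACGT")
--
-- def clean_dna(seq: str) -> str:
--     if seq is None:
--         return ""
--     return "".join(ch for ch in str(seq).upper() if ch in DNAAlphabet)
--
-- def homopolymer_count(seq: str, min_len: int = 2) -> int:
--     s = clean_dna(seq)
--     n = len(s)
--     m = max(min_len, 1)
--     cnt = 0
--     for i in range(n):
--         if (i == 0 or s[i] != s[i - 1]) and i + m <= n and all(s[j] == s[i] for j in range(i, i + m)):
--             cnt += 1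
--     return cnt
-- ===== Notes on version B (the rewrite author's own statement) =====
-- stated objective: alternative
-- what changed: Counts run-starts directly: for each index it checks that a new run begins there and verifies the run reaches length >= min_len by comparing a look-ahead window of max(min_len,1) characters, instead of A's streaming cur/cnt run-length accumulator with an end-of-string flush.
import Mathlib
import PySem

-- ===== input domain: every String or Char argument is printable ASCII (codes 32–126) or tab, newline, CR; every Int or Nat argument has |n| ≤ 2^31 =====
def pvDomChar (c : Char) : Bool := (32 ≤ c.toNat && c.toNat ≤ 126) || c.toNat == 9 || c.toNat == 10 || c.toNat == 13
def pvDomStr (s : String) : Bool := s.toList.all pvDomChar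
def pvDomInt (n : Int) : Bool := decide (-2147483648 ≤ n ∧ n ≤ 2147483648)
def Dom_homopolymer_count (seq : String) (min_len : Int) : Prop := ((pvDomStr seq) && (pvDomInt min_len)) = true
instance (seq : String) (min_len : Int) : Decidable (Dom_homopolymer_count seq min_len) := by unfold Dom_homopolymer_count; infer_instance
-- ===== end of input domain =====

-- B counts run-starts with a look-ahead window of max(min_len,1) characters instead of A's streaming cur/cnt run-length accumulator (alternative decomposition, same results).

-- ===== PORT A =====
-- clean_dna: uppercase then keep only ACGT characters (shared helper; both Pythons have the identical clean_dna)
def clean_dna (seq : String) : List Char :=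
  (PySem.Chars.upper seq.toList).filter (fun c => c == 'A' || c == 'C' || c == 'G' || c == 'T')

-- the body of A's 'for i in range(1, len(seq))' loop, state (cur, cnt)
def loopA (min_len : Int) (s : List Char) (st : Int × Int) (i : Int) : Int × Int :=
  if PySem.List.pyGetD s i ' ' = PySem.List.pyGetD s (i - 1) ' ' then
    (st.1 + 1, st.2)
  else
    (1, if min_len ≤ st.1 then st.2 + 1 else st.2)

def homopolymer_count (seq : String) (min_len : Int) : Int :=
  let s := clean_dna seq
  if s = [] then 0
  else
    let r := (PySem.List.pyRange 1 (s.length : Int) 1).foldl (loopA min_len s) (1, 0)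
    if min_len ≤ r.1 then r.2 + 1 else r.2

-- ===== PORT B =====
-- B's loop condition at index i: '(i == 0 or s[i] != s[i-1]) and i + m <= n and all(s[j] == s[i] for j in range(i, i+m))'.
-- All accesses Python makes are in range (s[i-1] only when i ≥ 1, s[j] with j < i+m ≤ n), so List.getD is exact;
-- the Nat 'i-1' at i = 0 is irrelevant because the first disjunct is already true there (like Python's 'or').
def qualB (m : Nat) (s : List Char) (i : Nat) : Bool :=
  (i == 0 || !(s.getD i ' ' == s.getD (i - 1) ' ')) && decide (i + m ≤ s.length)
    && (List.range' i m).all (fun j => s.getD j ' ' == s.getD i ' ')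

def homopolymer_count_alt (seq : String) (min_len : Int) : Int :=
  let s := clean_dna seq
  let m := (max min_len 1).toNat
  (((List.range s.length).filter (qualB m s)).length : Int)

-- ===== PRECONDITION & SPEC =====
def Spec_homopolymer_count (seq : String) (min_len : Int) (out : Int) : Prop := out = homopolymer_count_alt seq min_len
instance (seq : String) (min_len : Int) (out : Int) : Decidable (Spec_homopolymer_count seq min_len out) := by unfold Spec_homopolymer_count; infer_instance

-- ===== CLAIM (what is proved, stated in full; the proofs are below) =====
def Claim_equal_homopolymer_count : Prop := ∀ (seq : String) (min_len : Int), Dom_homopolymer_count seq min_len → Spec_homopolymer_count seq min_len (homopolymer_count seq min_len)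

-- ===== LEMMAS AND PROOFS =====

-- A's loop re-expressed as structural recursion over the remaining characters, carrying the previous character
def foldPairs (min_len : Int) (c : Char) (st : Int × Int) : List Char → Int × Int
  | [] => st
  | d :: rest =>
      if d = c then foldPairs min_len d (st.1 + 1, st.2) rest
      else foldPairs min_len d (1, if min_len ≤ st.1 then st.2 + 1 else st.2) rest

-- length of the maximal leading block of u equal to c
def lead (c : Char) : List Char → Nat
  | [] => 0
  | d :: t => if d = c then lead c t + 1 else 0

-- common spec: run-starts in c :: u (previous char p, none = string start) whose run has length ≥ m
def specCnt (m : Nat) : Option Char → Char → List Char → Int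
  | p, c, [] => if p ≠ some c ∧ m ≤ 1 then 1 else 0
  | p, c, d :: t => (if p ≠ some c ∧ m ≤ 1 + lead c (d :: t) then 1 else 0) + specCnt m (some c) d t

def tailCnt (m : Nat) (c : Char) : List Char → Int
  | [] => 0
  | d :: t => specCnt m (some c) d t

lemma getD_append_len (pre : List Char) (x : Char) (l : List Char) (d : Char) :
    (pre ++ x :: l).getD pre.length d = x := by
  induction pre with
  | nil => simp
  | cons a t ih => simpa using ih

lemma getD_append_add (pre v : List Char) (j : Nat) (d : Char) :
    (pre ++ v).getD (pre.length + j) d = v.getD j d := by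
  induction pre with
  | nil => simp
  | cons a t ih => simpa [Nat.succ_add] using ih

lemma fold_eq_foldPairs (min_len : Int) :
    ∀ (u : List Char) (pre : List Char) (c : Char) (st : Int × Int),
      (PySem.List.pyRange ((pre.length + 1 : Nat) : Int) ((pre ++ c :: u).length : Int) 1).foldl
        (loopA min_len (pre ++ c :: u)) st = foldPairs min_len c st u := by
  intro u
  induction u with
  | nil =>
    intro pre c st
    rw [PySem.List.pyRange_one_eq_nil (by simp)]
    rfl
  | cons d rest ih =>
    intro pre c st
    have hlen : ((pre.length + 1 : Nat) : Int) < ((pre ++ c :: d :: rest).length : Int) := by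
      simp
    have h1 : PySem.List.pyGetD (pre ++ c :: d :: rest) ((pre.length + 1 : Nat) : Int) ' ' = d := by
      rw [PySem.List.pyGetD_natCast]
      have he : pre ++ c :: d :: rest = (pre ++ [c]) ++ d :: rest := by simp
      rw [he]
      have hg := getD_append_len (pre ++ [c]) d rest ' '
      simpa using hg
    have h0 : PySem.List.pyGetD (pre ++ c :: d :: rest) (((pre.length + 1 : Nat) : Int) - 1) ' ' = c := by
      have he : (((pre.length + 1 : Nat) : Int) - 1) = ((pre.length : Nat) : Int) := by push_cast; ring
      rw [he, PySem.List.pyGetD_natCast]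
      exact getD_append_len pre c (d :: rest) ' '
    have hstep : loopA min_len (pre ++ c :: d :: rest) st ((pre.length + 1 : Nat) : Int) =
        if d = c then (st.1 + 1, st.2) else (1, if min_len ≤ st.1 then st.2 + 1 else st.2) := by
      unfold loopA
      rw [h1, h0]
    rw [PySem.List.pyRange_one_cons hlen, List.foldl_cons, hstep]
    have harg : ((pre.length + 1 : Nat) : Int) + 1 = (((pre ++ [c]).length + 1 : Nat) : Int) := by
      push_cast; simp
    have hre : pre ++ c :: d :: rest = (pre ++ [c]) ++ d :: rest := by simp
    simp only [foldPairs]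
    by_cases h : d = c
    · rw [if_pos h, if_pos h, hre, harg]
      rw [ih (pre ++ [c]) d (st.1 + 1, st.2)]
    · rw [if_neg h, if_neg h, hre, harg]
      rw [ih (pre ++ [c]) d (1, if min_len ≤ st.1 then st.2 + 1 else st.2)]

lemma fold_start (min_len : Int) (c : Char) (rest : List Char) :
    (PySem.List.pyRange 1 (((c :: rest).length : Nat) : Int) 1).foldl
      (loopA min_len (c :: rest)) (1, 0) = foldPairs min_len c (1, 0) rest := by
  have := fold_eq_foldPairs min_len rest [] c (1, 0)
  simpa using this

lemma specCnt_same (m : Nat) (c : Char) (u : List Char) :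
    specCnt m (some c) c u = tailCnt m c u := by
  cases u with
  | nil => simp [specCnt, tailCnt]
  | cons d t => simp [specCnt, tailCnt]

-- A's fold result, flushed, counts the current run (length cur + lead c t) and all later runs
lemma foldPairs_spec (ml : Int) (m : Nat) (hm : m = (max ml 1).toNat) :
    ∀ (t : List Char) (c : Char) (cur cnt : Int), 1 ≤ cur →
      (if ml ≤ (foldPairs ml c (cur, cnt) t).1 then (foldPairs ml c (cur, cnt) t).2 + 1
        else (foldPairs ml c (cur, cnt) t).2) =
      cnt + (if ml ≤ cur + (lead c t : Int) then 1 else 0) + tailCnt m c t := by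
  intro t
  induction t with
  | nil =>
    intro c cur cnt _
    simp only [foldPairs, lead, tailCnt]
    by_cases h : ml ≤ cur <;> simp [h] <;> omega
  | cons d rest ih =>
    intro c cur cnt hcur
    by_cases h : d = c
    · subst h
      have h1 : foldPairs ml d (cur, cnt) (d :: rest) = foldPairs ml d (cur + 1, cnt) rest := by
        simp [foldPairs]
      have h2 : tailCnt m d (d :: rest) = tailCnt m d rest := by
        simp [tailCnt, specCnt_same]
      have h3 : lead d (d :: rest) = lead d rest + 1 := by simp [lead]
      rw [h1, ih d (cur + 1) cnt (by omega), h2, h3]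
      have hc : (ml ≤ cur + ((lead d rest + 1 : Nat) : Int)) ↔ ml ≤ cur + 1 + (lead d rest : Int) := by
        push_cast; omega
      rw [if_congr hc rfl rfl]
    · have h1 : foldPairs ml c (cur, cnt) (d :: rest) =
          foldPairs ml d (1, if ml ≤ cur then cnt + 1 else cnt) rest := by
        simp [foldPairs, h]
      have h3 : lead c (d :: rest) = 0 := by simp [lead, h]
      rw [h1, ih d 1 (if ml ≤ cur then cnt + 1 else cnt) le_rfl, h3]
      have hne : some c ≠ some d := fun he => h (Option.some.inj he).symm
      have h2 : tailCnt m c (d :: rest) =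
          (if m ≤ 1 + lead d rest then 1 else 0) + tailCnt m d rest := by
        cases rest with
        | nil => simp [tailCnt, specCnt, lead, hne]
        | cons e t2 => simp [tailCnt, specCnt, lead, hne]
      rw [h2]
      have hb : (ml ≤ 1 + (lead d rest : Int)) ↔ m ≤ 1 + lead d rest := by omega
      generalize tailCnt m d rest = T
      by_cases hA : ml ≤ cur <;> by_cases hB : m ≤ 1 + lead d rest <;>
        simp [hA, hB, ← hb] <;> push_cast <;> omega

-- window check: all of the first m characters of u equal c (c never ' ', the getD default)
lemma window_aux (c : Char) (hc : c ≠ ' ') :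
    ∀ (u : List Char) (m : Nat), (∀ k < m, u.getD k ' ' = c) ↔ m ≤ lead c u := by
  intro u
  induction u with
  | nil =>
    intro m
    constructor
    · intro h
      by_contra hm
      have h0 := h 0 (by omega)
      simp at h0
      exact hc h0.symm
    · intro h k hk
      simp [lead] at h
      omega
  | cons d t ih =>
    intro m
    cases m with
    | zero => simp [lead]
    | succ m' =>
      constructor
      · intro h
        have hd : d = c := by simpa using h 0 (Nat.succ_pos _)
        subst hd
        have ht : ∀ k < m', t.getD k ' ' = d := by
          intro k hk
          simpa using h (k + 1) (by omega)
        have := (ih m').mp ht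
        simp [lead]
        omega
      · intro h
        have hd : d = c := by
          by_contra hd
          simp [lead, hd] at h
        subst hd
        simp [lead] at h
        intro k hk
        cases k with
        | zero => rfl
        | succ k' => simpa using (ih m').mpr (by omega) k' (by omega)

lemma lead_le (c : Char) : ∀ (u : List Char), lead c u ≤ u.length := by
  intro u
  induction u with
  | nil => simp [lead]
  | cons d t ih => by_cases h : d = c <;> simp [lead, h] <;> omega

lemma window_cons (c : Char) (hc : c ≠ ' ') (u : List Char) (m : Nat) :
    ((m ≤ u.length + 1) ∧ ∀ k < m, (c :: u).getD k ' ' = c) ↔ m ≤ 1 + lead c u := by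
  constructor
  · rintro ⟨hb, hw⟩
    cases m with
    | zero => omega
    | succ m' =>
      have ht : ∀ k < m', u.getD k ' ' = c := by
        intro k hk
        simpa using hw (k + 1) (by omega)
      have := (window_aux c hc u m').mp ht
      omega
  · intro h
    have hle := lead_le c u
    refine ⟨by omega, ?_⟩
    intro k hk
    cases k with
    | zero => rfl
    | succ k' =>
      have ht := (window_aux c hc u (lead c u)).mpr le_rfl
      exact by simpa using ht k' (by omega)

lemma window_full (m : Nat) (pre : List Char) (c : Char) (u : List Char) (hc : c ≠ ' ') :
    (decide (pre.length + m ≤ (pre ++ c :: u).length) &&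
      (List.range' pre.length m).all (fun j => (pre ++ c :: u).getD j ' ' == c))
    = decide (m ≤ 1 + lead c u) := by
  refine Bool.eq_iff_iff.mpr ?_
  simp only [Bool.and_eq_true, decide_eq_true_eq, List.all_eq_true, List.mem_range'_1,
    beq_iff_eq, List.length_append, List.length_cons]
  rw [← window_cons c hc u m]
  constructor
  · rintro ⟨hb, hw⟩
    refine ⟨by omega, ?_⟩
    intro k hk
    have := hw (pre.length + k) ⟨by omega, by omega⟩
    rwa [getD_append_add] at this
  · rintro ⟨hb, hw⟩
    refine ⟨by omega, ?_⟩
    intro j ⟨hj1, hj2⟩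
    have he : j = pre.length + (j - pre.length) := by omega
    rw [he, getD_append_add]
    exact hw (j - pre.length) (by omega)

-- the 'i == 0 or s[i] != s[i-1]' part: i = pre.length starts a run iff pre does not end in c
lemma start_iff (pre : List Char) (c : Char) (u : List Char) :
    (((pre.length == 0) || !(c == (pre ++ c :: u).getD (pre.length - 1) ' ')) = true)
      ↔ pre.getLast? ≠ some c := by
  rcases List.eq_nil_or_concat pre with rfl | ⟨q, p, rfl⟩
  · simp
  · simp only [List.concat_eq_append]
    have hlen : (q ++ [p]).length = q.length + 1 := by simp
    have hprev : ((q ++ [p]) ++ c :: u).getD ((q ++ [p]).length - 1) ' ' = p := by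
      rw [hlen]
      simp only [Nat.add_sub_cancel]
      have hassoc : (q ++ [p]) ++ c :: u = q ++ p :: (c :: u) := by simp
      rw [hassoc]
      exact getD_append_len q p (c :: u) ' '
    rw [hprev, List.getLast?_concat, hlen]
    constructor
    · intro h he
      have := Option.some.inj he
      simp [this] at h
    · intro h
      have : c ≠ p := fun he => h (by rw [he])
      simp [this]

-- the whole B condition at position pre.length in pre ++ c :: u
lemma qual_head (m : Nat) (pre : List Char) (c : Char) (u : List Char) (hc : c ≠ ' ') :
    qualB m (pre ++ c :: u) pre.length = true ↔ (pre.getLast? ≠ some c ∧ m ≤ 1 + lead c u) := by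
  unfold qualB
  rw [getD_append_len pre c u ' ', Bool.and_assoc, window_full m pre c u hc]
  simp only [Bool.and_eq_true, decide_eq_true_eq]
  rw [start_iff pre c u]

lemma Bmain (m : Nat) :
    ∀ (u pre : List Char) (c : Char), (∀ x ∈ c :: u, x ≠ ' ') →
      ((((List.range' pre.length (u.length + 1)).filter (qualB m (pre ++ c :: u))).length : Nat) : Int)
        = specCnt m pre.getLast? c u := by
  intro u
  induction u with
  | nil =>
    intro pre c hx
    have hc : c ≠ ' ' := hx c (by simp)
    have h1 : List.range' pre.length (List.length ([] : List Char) + 1) = [pre.length] := by simp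
    rw [h1, List.filter_cons, List.filter_nil]
    by_cases hcond : pre.getLast? ≠ some c ∧ m ≤ 1 + lead c ([] : List Char)
    · rw [if_pos ((qual_head m pre c [] hc).mpr hcond)]
      have hm1 : m ≤ 1 := by simpa [lead] using hcond.2
      simp [specCnt, hcond.1, hm1]
    · rw [if_neg (fun h => hcond ((qual_head m pre c [] hc).mp h))]
      have hno : ¬(pre.getLast? ≠ some c ∧ m ≤ 1) := by
        intro h
        obtain ⟨h1, h2⟩ := h
        exact hcond ⟨h1, by omega⟩
      rw [show specCnt m pre.getLast? c [] =
        (if pre.getLast? ≠ some c ∧ m ≤ 1 then 1 else 0) from rfl, if_neg hno]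
      simp
  | cons d u2 ih =>
    intro pre c hx
    have hc : c ≠ ' ' := hx c (by simp)
    have hx2 : ∀ x ∈ d :: u2, x ≠ ' ' := fun x hm => hx x (by simp [hm])
    rw [List.range'_succ, List.filter_cons, show (d :: u2).length = u2.length + 1 from rfl]
    have hre : pre ++ c :: d :: u2 = (pre ++ [c]) ++ d :: u2 := by simp
    have hlen : pre.length + 1 = (pre ++ [c]).length := by simp
    have hih := ih (pre ++ [c]) d hx2
    rw [List.getLast?_concat] at hih
    have hspec : specCnt m pre.getLast? c (d :: u2) =
        (if pre.getLast? ≠ some c ∧ m ≤ 1 + lead c (d :: u2) then 1 else 0)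
          + specCnt m (some c) d u2 := rfl
    by_cases hcond : pre.getLast? ≠ some c ∧ m ≤ 1 + lead c (d :: u2)
    · rw [if_pos ((qual_head m pre c (d :: u2) hc).mpr hcond), hspec, if_pos hcond,
        hre, hlen, ← hih, List.length_cons]
      push_cast
      ring
    · rw [if_neg (fun h => hcond ((qual_head m pre c (d :: u2) hc).mp h)), hspec, if_neg hcond,
        hre, hlen, ← hih]
      simp

lemma clean_no_space (seq : String) : ∀ x ∈ clean_dna seq, x ≠ ' ' := by
  intro x hx
  unfold clean_dna at hx
  have := (List.mem_filter.mp hx).2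
  intro he
  subst he
  simp at this

-- ===== VERDICT (by name: the statement is the Claim_ definition above) =====
theorem homopolymer_count_spec : Claim_equal_homopolymer_count := by
  intro seq ml _
  show homopolymer_count seq ml = homopolymer_count_alt seq ml
  unfold homopolymer_count homopolymer_count_alt
  cases hs : clean_dna seq with
  | nil => simp [hs]
  | cons c rest =>
    simp only [hs]
    have hx : ∀ x ∈ c :: rest, x ≠ ' ' := fun x hxm => clean_no_space seq x (hs ▸ hxm)
    rw [if_neg (List.cons_ne_nil c rest), fold_start ml c rest]
    set m := (max ml 1).toNat with hm
    rw [foldPairs_spec ml m hm rest c 1 0 le_rfl]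
    have hB := Bmain m rest [] c hx
    simp only [List.length_nil, List.nil_append, List.getLast?_nil] at hB
    rw [show (c :: rest).length = rest.length + 1 from rfl, List.range_eq_range', hB]
    have hb : (ml ≤ 1 + (lead c rest : Int)) ↔ m ≤ 1 + lead c rest := by omega
    cases rest with
    | nil =>
      simp only [specCnt, tailCnt, show lead c [] = 0 from rfl]
      have hnone : (none : Option Char) ≠ some c := by simp
      by_cases h2 : m ≤ 1
      · have hcnd : (none : Option Char) ≠ some c ∧ m ≤ 1 := ⟨hnone, h2⟩
        rw [if_pos hcnd, if_pos (show ml ≤ 1 + ((0 : Nat) : Int) by omega)]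
        norm_num
      · have hcnd : ¬((none : Option Char) ≠ some c ∧ m ≤ 1) := fun h => h2 h.2
        rw [if_neg hcnd, if_neg (show ¬ ml ≤ 1 + ((0 : Nat) : Int) by omega)]
        norm_num
    | cons d t =>
      simp only [specCnt, tailCnt]
      have hnone : (none : Option Char) ≠ some c := by simp
      by_cases h2 : m ≤ 1 + lead c (d :: t)
      · have hcnd : (none : Option Char) ≠ some c ∧ m ≤ 1 + lead c (d :: t) := ⟨hnone, h2⟩
        rw [if_pos hcnd, if_pos (hb.mpr h2)]
        ring
      · have hcnd : ¬((none : Option Char) ≠ some c ∧ m ≤ 1 + lead c (d :: t)) := fun h => h2 h.2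
        rw [if_neg hcnd, if_neg (fun h => h2 (hb.mp h))]
        ring
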